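-- pv_equiv track=rewrite | github.com/manojkilaru97/sglang | python/sglang/srt/function_call/json_array_parser.py | _has_complete_top_level_array
-- ===== SOURCE A (Python) =====
-- def _has_complete_top_level_array(text: str) -> bool:
--     in_string = False
--     escaped = False
--     depth = 0
--     seen_array = False
--     for ch in text:
--         if escaped:
--             escaped = False
--             continue
--         if ch == "\\" and in_string:
--             escaped = True
--             continue
--         if ch == '"':
--             in_string = not in_string
--             continue
--         if in_string:
--             continue
--         if ch in "[{":
--             depth += 1
--             if ch == "[" and not seen_array:
--                 seen_array = True
--             continue
--         if ch in "]}":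
--             depth -= 1
--             if seen_array and depth == 0 and ch == "]":
--                 return True
--     return False
-- ===== SOURCE B (Python) =====
-- def _has_complete_top_level_array(text: str) -> bool:
--     # Pass 1: collect structural brackets that occur outside string literals.
--     brackets = []
--     in_string = False
--     escaped = False
--     for ch in text:
--         if escaped:
--             escaped = False
--         elif ch == "\\" and in_string:
--             escaped = True
--         elif ch == '"':
--             in_string = not in_string
--         elif not in_string and ch in "[{]}":
--             brackets.append(ch)
--     # Pass 2: evaluate depth over the bracket tokens.
--     depth = 0
--     seen_array = False
--     for ch in brackets:
--         if ch in "[{":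
--             depth += 1
--             if ch == "[":
--                 seen_array = True
--         else:
--             depth -= 1
--             if seen_array and depth == 0 and ch == "]":
--                 return True
--     return False
-- ===== Notes on version B (the rewrite author's own statement) =====
-- stated objective: alternative
-- what changed: Split A's fused single-pass scan into two passes: a tokenizer that runs only the string/escape state machine and collects the structural brackets, followed by a separate depth-counting evaluation over that token list.
import Mathlib
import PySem

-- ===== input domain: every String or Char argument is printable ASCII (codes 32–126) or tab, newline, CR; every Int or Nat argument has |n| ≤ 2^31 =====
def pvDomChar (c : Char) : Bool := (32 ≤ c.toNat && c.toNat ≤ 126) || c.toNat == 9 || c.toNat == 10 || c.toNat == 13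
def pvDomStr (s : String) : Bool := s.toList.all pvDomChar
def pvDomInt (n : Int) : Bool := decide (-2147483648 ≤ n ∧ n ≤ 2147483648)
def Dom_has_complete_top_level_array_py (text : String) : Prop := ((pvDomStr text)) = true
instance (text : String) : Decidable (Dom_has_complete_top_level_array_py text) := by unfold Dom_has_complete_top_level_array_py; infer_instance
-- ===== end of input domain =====

-- B replaces A's fused single-pass scan by a two-pass decomposition (tokenize brackets, then
-- evaluate depth); objective: alternative structure, same cost.

-- ===== PORT A =====
-- A's fused loop over the characters with state (in_string, escaped, depth, seen_array);
-- `return True` is modelled by the branch returning `true` directly.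
def pvALoop (chars : List Char) (in_string escaped : Bool) (depth : Int) (seen_array : Bool) : Bool :=
  match chars with
  | [] => false
  | ch :: rest =>
    if escaped then pvALoop rest in_string false depth seen_array
    else if ch = '\\' ∧ in_string then pvALoop rest in_string true depth seen_array
    else if ch = '"' then pvALoop rest (!in_string) escaped depth seen_array
    else if in_string then pvALoop rest in_string escaped depth seen_array
    else if ch = '[' ∨ ch = '{' then
      pvALoop rest in_string escaped (depth + 1)
        (if ch = '[' ∧ ¬seen_array then true else seen_array)
    else if ch = ']' ∨ ch = '}' then
      if seen_array ∧ depth - 1 = 0 ∧ ch = ']' then true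
      else pvALoop rest in_string escaped (depth - 1) seen_array
    else pvALoop rest in_string escaped depth seen_array

def has_complete_top_level_array_py (text : String) : Bool :=
  pvALoop text.toList false false 0 false

-- ===== PORT B =====
-- Pass 1: collect structural brackets occurring outside string literals.
def pvTokens (chars : List Char) (in_string escaped : Bool) : List Char :=
  match chars with
  | [] => []
  | ch :: rest =>
    if escaped then pvTokens rest in_string false
    else if ch = '\\' ∧ in_string then pvTokens rest in_string true
    else if ch = '"' then pvTokens rest (!in_string) escaped
    else if ¬in_string ∧ (ch = '[' ∨ ch = '{' ∨ ch = ']' ∨ ch = '}') then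
      ch :: pvTokens rest in_string escaped
    else pvTokens rest in_string escaped

-- Pass 2: depth evaluation over the bracket tokens.
def pvEval (toks : List Char) (depth : Int) (seen_array : Bool) : Bool :=
  match toks with
  | [] => false
  | ch :: rest =>
    if ch = '[' ∨ ch = '{' then
      pvEval rest (depth + 1) (if ch = '[' then true else seen_array)
    else
      if seen_array ∧ depth - 1 = 0 ∧ ch = ']' then true
      else pvEval rest (depth - 1) seen_array

def has_complete_top_level_array_py_alt (text : String) : Bool :=
  pvEval (pvTokens text.toList false false) 0 false

-- ===== PRECONDITION & SPEC =====
def Spec_has_complete_top_level_array_py (text : String) (out : Bool) : Prop := out = has_complete_top_level_array_py_alt text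
instance (text : String) (out : Bool) : Decidable (Spec_has_complete_top_level_array_py text out) := by unfold Spec_has_complete_top_level_array_py; infer_instance

-- ===== CLAIM (what is proved, stated in full; the proofs are below) =====
def Claim_equal_has_complete_top_level_array_py : Prop := ∀ (text : String), Dom_has_complete_top_level_array_py text → Spec_has_complete_top_level_array_py text (has_complete_top_level_array_py text)

-- ===== LEMMAS AND PROOFS =====
-- The fused loop equals tokenize-then-evaluate, for every intermediate state.
theorem pvALoop_eq_eval_tokens (chars : List Char) :
    ∀ (in_string escaped : Bool) (depth : Int) (seen_array : Bool),
      pvALoop chars in_string escaped depth seen_array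
        = pvEval (pvTokens chars in_string escaped) depth seen_array := by
  induction chars with
  | nil => intro _ _ _ _; simp [pvALoop, pvTokens, pvEval]
  | cons ch rest ih =>
    intro in_string escaped depth seen_array
    by_cases hesc : escaped = true
    · simp [pvALoop, pvTokens, hesc, ih]
    · simp only [Bool.not_eq_true] at hesc
      subst hesc
      by_cases hbs : ch = '\\' ∧ in_string = true
      · simp [pvALoop, pvTokens, hbs, ih]
      · by_cases hq : ch = '"'
        · simp [pvALoop, pvTokens, hq, ih]
        · by_cases hin : in_string = true
          · have hnb : ch ≠ '\\' := fun h => hbs ⟨h, hin⟩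
            simp [pvALoop, pvTokens, hq, hin, hnb, ih]
          · simp only [Bool.not_eq_true] at hin
            subst hin
            by_cases hopen : ch = '[' ∨ ch = '{'
            · rcases hopen with h | h <;>
                simp [pvALoop, pvTokens, pvEval, h, ih]
            · by_cases hclose : ch = ']' ∨ ch = '}'
              · rcases hclose with h | h <;>
                  simp [pvALoop, pvTokens, pvEval, h, ih]
              · simp [pvALoop, pvTokens, hq, hopen, hclose, ih]

-- ===== VERDICT (by name: the statement is the Claim_ definition above) =====
theorem has_complete_top_level_array_py_spec : Claim_equal_has_complete_top_level_array_py := by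
  intro text _
  unfold Spec_has_complete_top_level_array_py has_complete_top_level_array_py has_complete_top_level_array_py_alt
  exact pvALoop_eq_eval_tokens _ _ _ _ _
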